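-- pv_equiv track=rewrite | github.com/DanielBenda/AdventOfCode2025 | days/day02/solution.py | all_possible_splits
-- ===== SOURCE A (Python) =====
-- def all_possible_splits(n):
--     s = str(n)
--     L = len(s)
--     results = {}
--
--     for k in range(2, L + 1):
--         if L % k == 0:
--             size = L // k
--             parts = [int(s[i:i+size]) for i in range(0, L, size)]
--             results[k] = parts
--
--     return results
-- ===== SOURCE B (Python) =====
-- def all_possible_splits(n):
--     s = str(n)
--     L = len(s)
--     divs = set()
--     i = 1
--     while i * i <= L:
--         if L % i == 0:
--             divs.add(i)
--             divs.add(L // i)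
--         i += 1
--     results = {}
--     for k in sorted(divs):
--         if k >= 2:
--             size = L // k
--             results[k] = [int(s[j:j+size]) for j in range(0, L, size)]
--     return results
-- ===== Notes on version B (the rewrite author's own statement) =====
-- stated objective: alternative
-- what changed: B enumerates the divisors of the digit-count L in divisor pairs up to sqrt(L) into a set and iterates them sorted, instead of A's linear scan of every k in 2..L; the slicing of the digit string per divisor is unchanged.
import Mathlib
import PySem

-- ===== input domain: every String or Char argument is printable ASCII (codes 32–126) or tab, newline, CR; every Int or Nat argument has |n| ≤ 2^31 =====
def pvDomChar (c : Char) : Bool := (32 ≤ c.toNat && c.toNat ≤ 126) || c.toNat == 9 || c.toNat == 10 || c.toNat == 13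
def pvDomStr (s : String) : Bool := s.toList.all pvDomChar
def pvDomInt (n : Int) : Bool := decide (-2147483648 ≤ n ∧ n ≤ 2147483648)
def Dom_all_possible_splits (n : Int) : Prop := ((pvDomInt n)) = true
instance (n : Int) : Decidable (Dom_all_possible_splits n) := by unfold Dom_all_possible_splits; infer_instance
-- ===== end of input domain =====

-- B replaces A's linear 2..L divisor scan with √L divisor-pair enumeration into a set,
-- then emits the same dict over the sorted divisors ≥ 2 (objective: alternative algorithm).

-- ===== PORT A =====
def all_possible_splits (n : Int) : List (Int × List Int) :=
  let s := PySem.Int.toChars n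
  let L : Int := PySem.List.len s
  ((PySem.List.pyRange 2 (L + 1) 1).foldl (fun results k =>
    if PySem.Int.mod L k = 0 then
      let size := PySem.Int.floordiv L k
      let parts := (PySem.List.pyRange 0 L size).map (fun i =>
        (PySem.Int.ofChars? (PySem.List.slice s (some i) (some (i + size)))).getD 0)
      results.insert k parts
    else results) PySem.Dict.empty).items

-- ===== PORT B =====
-- the 'while i * i <= L' divisor-collecting loop of Source B
def pvCollectDivs (L : Int) (i : Int) (acc : PySem.Set Int) : PySem.Set Int :=
  if h : i * i ≤ L then
    pvCollectDivs L (i + 1)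
      (if PySem.Int.mod L i = 0 then (acc.add i).add (PySem.Int.floordiv L i) else acc)
  else acc
termination_by (L + 1 - i).toNat
decreasing_by
  have hii : i ≤ i * i := by nlinarith [sq_nonneg i, sq_nonneg (i - 1)]
  omega

def all_possible_splits_alt (n : Int) : List (Int × List Int) :=
  let s := PySem.Int.toChars n
  let L : Int := PySem.List.len s
  let divs := pvCollectDivs L 1 PySem.Set.empty
  ((PySem.List.sorted divs (fun x => x) false).foldl (fun results k =>
    if 2 ≤ k then
      let size := PySem.Int.floordiv L k
      results.insert k ((PySem.List.pyRange 0 L size).map (fun j =>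
        (PySem.Int.ofChars? (PySem.List.slice s (some j) (some (j + size)))).getD 0))
    else results) PySem.Dict.empty).items

-- ===== PRECONDITION & SPEC =====
-- Pre_ excludes n < 0: there str(n) starts with '-', the k = L split slices the bare
-- sign character and int('-') raises ValueError in A (and in B alike).
def Pre_all_possible_splits (n : Int) : Prop := 0 ≤ n
instance (n : Int) : Decidable (Pre_all_possible_splits n) := by unfold Pre_all_possible_splits; infer_instance
def pvWitness_all_possible_splits : Int := (123456)

def Spec_all_possible_splits (n : Int) (out : List (Int × List Int)) : Prop := out = all_possible_splits_alt n
instance (n : Int) (out : List (Int × List Int)) : Decidable (Spec_all_possible_splits n out) := by unfold Spec_all_possible_splits; infer_instance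

-- ===== CLAIM (what is proved, stated in full; the proofs are below) =====
def Claim_equal_all_possible_splits : Prop := ∀ (n : Int), Dom_all_possible_splits n → Pre_all_possible_splits n → Spec_all_possible_splits n (all_possible_splits n)

-- ===== LEMMAS AND PROOFS =====

-- the collecting loop keeps the set duplicate-free
lemma pv_nodup_collect (L : Int) (i : Int) (acc : PySem.Set Int) (h : acc.Nodup) :
    (pvCollectDivs L i acc).Nodup := by
  fun_induction pvCollectDivs L i acc with
  | case1 i acc hle ih =>
    apply ih
    split
    · exact PySem.Set.nodup_add _ _ (PySem.Set.nodup_add _ _ h)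
    · exact h
  | case2 i acc hle => exact h

-- membership in the √L collecting loop, as a statement about the remaining indices
lemma pv_mem_collect (L d : Int) (i : Int) (acc : PySem.Set Int) :
    0 ≤ i → (d ∈ pvCollectDivs L i acc ↔
      d ∈ acc ∨ ∃ j : Int, i ≤ j ∧ j * j ≤ L ∧ PySem.Int.mod L j = 0 ∧
        (d = j ∨ d = PySem.Int.floordiv L j)) := by
  fun_induction pvCollectDivs L i acc with
  | case1 i acc hle ih =>
    intro hi
    simp only [dite_eq_ite] at ih
    rw [ih (by omega)]
    constructor
    · rintro (hmem | ⟨j, hj1, hj2, hj3, hj4⟩)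
      · split at hmem
        · rcases (PySem.Set.mem_add _ _ _).1 hmem with hmem' | rfl
          · rcases (PySem.Set.mem_add _ _ _).1 hmem' with hmem'' | rfl
            · exact Or.inl hmem''
            · exact Or.inr ⟨d, le_refl d, hle, by assumption, Or.inl rfl⟩
          · exact Or.inr ⟨i, le_refl i, hle, by assumption, Or.inr rfl⟩
        · exact Or.inl hmem
      · exact Or.inr ⟨j, by omega, hj2, hj3, hj4⟩
    · rintro (hmem | ⟨j, hj1, hj2, hj3, hj4⟩)
      · left; split
        · exact (PySem.Set.mem_add _ _ _).2 (Or.inl ((PySem.Set.mem_add _ _ _).2 (Or.inl hmem)))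
        · exact hmem
      · by_cases hji : j = i
        · subst hji
          left
          simp only [hj3, if_true, PySem.Set.mem_add]
          rcases hj4 with rfl | rfl
          · tauto
          · tauto
        · exact Or.inr ⟨j, by omega, hj2, hj3, hj4⟩
  | case2 i acc hle =>
    intro hi
    constructor
    · exact Or.inl
    · rintro (hmem | ⟨j, hj1, hj2, hj3, hj4⟩)
      · exact hmem
      · exfalso; nlinarith

-- the collected set is exactly the set of divisors of L in [1, L]
lemma pv_mem_set (L : Int) (hL : 0 ≤ L) (d : Int) :
    d ∈ pvCollectDivs L 1 PySem.Set.empty ↔ 1 ≤ d ∧ d ≤ L ∧ d ∣ L := by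
  rw [pv_mem_collect L d 1 PySem.Set.empty (by omega)]
  simp only [PySem.Set.empty, List.not_mem_nil, false_or]
  constructor
  · rintro ⟨j, hj1, hj2, hj3, hj4⟩
    have hjd : j ∣ L := (PySem.Int.mod_eq_zero_iff_dvd L j).1 hj3
    have hfd : PySem.Int.floordiv L j = L / j := PySem.Int.floordiv_eq_ediv_of_pos (by omega)
    rw [hfd] at hj4
    have hmul : j * (L / j) = L := Int.mul_ediv_cancel' hjd
    have hL1 : 1 ≤ L := by nlinarith
    have hq0 : 0 ≤ L / j := Int.ediv_nonneg (by omega) (by omega)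
    have hq1 : 1 ≤ L / j := by
      rcases lt_or_ge (L / j) 1 with h | h
      · have h0 : L / j = 0 := by omega
        rw [h0, mul_zero] at hmul; omega
      · exact h
    rcases hj4 with rfl | rfl
    · exact ⟨hj1, by nlinarith, hjd⟩
    · exact ⟨hq1, by nlinarith, ⟨j, by linarith [mul_comm j (L / j)]⟩⟩
  · rintro ⟨hd1, hd2, hdd⟩
    by_cases hdl : d * d ≤ L
    · exact ⟨d, hd1, hdl, (PySem.Int.mod_eq_zero_iff_dvd L d).2 hdd, Or.inl rfl⟩
    · have hmul : d * (L / d) = L := Int.mul_ediv_cancel' hdd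
      set q := L / d with hq
      have hLq : L = q * d := by linarith [mul_comm d q]
      have hq1 : 1 ≤ q := by
        rcases lt_or_ge q 1 with h | h
        · have hle : q * d ≤ 0 := mul_nonpos_of_nonpos_of_nonneg (by omega) (by omega)
          omega
        · exact h
      have hqd : q < d := by nlinarith
      refine ⟨q, hq1, by nlinarith, (PySem.Int.mod_eq_zero_iff_dvd L q).2 ⟨d, hLq⟩, Or.inr ?_⟩
      have hfd : PySem.Int.floordiv L q = L / q := PySem.Int.floordiv_eq_ediv_of_pos (by omega)
      rw [hfd, hLq, Int.mul_ediv_cancel_left _ (by omega)]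

-- sorting the set lists all divisors of L in [1, L] in ascending order
lemma pv_sorted_eq (L : Int) (hL : 0 ≤ L) :
    PySem.List.sorted (pvCollectDivs L 1 PySem.Set.empty) (fun x => x) false
      = (PySem.List.pyRange 1 (L + 1) 1).filter (fun k => decide (PySem.Int.mod L k = 0)) := by
  apply PySem.List.sorted_eq_of_perm_of_pairwise_lt
  · rw [List.perm_ext_iff_of_nodup
      ((PySem.List.nodup_pyRange_one 1 (L + 1)).filter _)
      (pv_nodup_collect L 1 PySem.Set.empty List.nodup_nil)]
    intro a
    rw [pv_mem_set L hL a, List.mem_filter, PySem.List.mem_pyRange_one]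
    simp only [decide_eq_true_eq, PySem.Int.mod_eq_zero_iff_dvd]
    exact ⟨fun ⟨⟨h1, h2⟩, h3⟩ => ⟨h1, by omega, h3⟩, fun ⟨h1, h2, h3⟩ => ⟨⟨h1, by omega⟩, h3⟩⟩
  · exact (PySem.List.pairwise_lt_pyRange_one 1 (L + 1)).filter _

-- dropping the divisor 1 from the ascending divisor list gives A's key list
lemma pv_keys (L : Int) (hL : 0 ≤ L) :
    ((PySem.List.pyRange 1 (L + 1) 1).filter (fun k => decide (PySem.Int.mod L k = 0))).filter
        (fun k => decide (2 ≤ k))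
      = (PySem.List.pyRange 2 (L + 1) 1).filter (fun k => decide (PySem.Int.mod L k = 0)) := by
  rw [List.filter_filter]
  rcases lt_or_ge L 1 with h | h
  · rw [PySem.List.pyRange_one_eq_nil (by omega), PySem.List.pyRange_one_eq_nil (by omega)]
    rfl
  · rw [PySem.List.pyRange_one_cons (by omega)]
    rw [List.filter_cons]
    norm_num
    apply List.filter_congr
    intro x hx
    have : 2 ≤ x := (PySem.List.mem_pyRange_one.1 hx).1
    simp [this]

-- ===== VERDICT (by name: the statement is the Claim_ definition above) =====
theorem all_possible_splits_spec : Claim_equal_all_possible_splits := by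
  intro n _ _
  unfold Spec_all_possible_splits
  simp only [all_possible_splits, all_possible_splits_alt]
  set s := PySem.Int.toChars n with hs
  have hL : (0:Int) ≤ PySem.List.len s := by simp
  set L := PySem.List.len s with hLdef
  rw [PySem.List.foldl_ite_eq_foldl_filter, PySem.List.foldl_ite_eq_foldl_filter]
  rw [pv_sorted_eq L hL, pv_keys L hL]
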